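-- pv_equiv track=rewrite | github.com/moaahil1110/Atos-Srijan-Hackathon | backend/utils/service_mapper.py | get_generic_concept
-- ===== SOURCE A (Python) =====
-- SERVICE_EQUIVALENTS = {
--     "object_storage": {
--         "aws": "S3",
--         "azure": "Blob Storage",
--         "gcp": "Cloud Storage",
--         "display": "Object Storage",
--     },
--     "relational_db": {
--         "aws": "RDS",
--         "azure": "Azure Database for PostgreSQL",
--         "gcp": "Cloud SQL",
--         "display": "Relational Database",
--     },
--     "identity": {
--         "aws": "IAM",
--         "azure": "Azure Active Directory",
--         "gcp": "Cloud IAM",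
--         "display": "Identity & Access Management",
--     },
--     "compute": {
--         "aws": "EC2",
--         "azure": "Virtual Machines",
--         "gcp": "Compute Engine",
--         "display": "Compute",
--     },
--     "serverless": {
--         "aws": "Lambda",
--         "azure": "Azure Functions",
--         "gcp": "Cloud Functions",
--         "display": "Serverless Functions",
--     },
--     "cdn": {
--         "aws": "CloudFront",
--         "azure": "Azure CDN",
--         "gcp": "Cloud CDN",
--         "display": "CDN",
--     },
-- }
--
-- def get_generic_concept(service: str) -> str | None:
--     normalized = service.strip().lower()
--     for concept, mapping in SERVICE_EQUIVALENTS.items():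
--         if normalized == concept:
--             return concept
--         for provider_name in ("aws", "azure", "gcp"):
--             if mapping.get(provider_name, "").lower() == normalized:
--                 return concept
--     return None
-- ===== SOURCE B (Python) =====
-- # B: precomputed reverse index (concept names and lowercased provider service names -> concept);
-- # query is a single dict lookup instead of A's nested scan. Same None/raise behaviour via strip().lower().
-- REVERSE = {
--     "object_storage": "object_storage",
--     "s3": "object_storage",
--     "blob storage": "object_storage",
--     "cloud storage": "object_storage",
--     "relational_db": "relational_db",
--     "rds": "relational_db",
--     "azure database for postgresql": "relational_db",
--     "cloud sql": "relational_db",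
--     "identity": "identity",
--     "iam": "identity",
--     "azure active directory": "identity",
--     "cloud iam": "identity",
--     "compute": "compute",
--     "ec2": "compute",
--     "virtual machines": "compute",
--     "compute engine": "compute",
--     "serverless": "serverless",
--     "lambda": "serverless",
--     "azure functions": "serverless",
--     "cloud functions": "serverless",
--     "cdn": "cdn",
--     "cloudfront": "cdn",
--     "azure cdn": "cdn",
--     "cloud cdn": "cdn",
-- }
--
-- def get_generic_concept(service: str) -> str | None:
--     return REVERSE.get(service.strip().lower())
-- ===== Notes on version B (the rewrite author's own statement) =====
-- stated objective: simpler
-- what changed: Replaced the query-time nested scan over concepts and their aws/azure/gcp values with a single lookup in a precomputed reverse dict mapping each concept name and each lowercased provider service name to its concept.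
import Mathlib
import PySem

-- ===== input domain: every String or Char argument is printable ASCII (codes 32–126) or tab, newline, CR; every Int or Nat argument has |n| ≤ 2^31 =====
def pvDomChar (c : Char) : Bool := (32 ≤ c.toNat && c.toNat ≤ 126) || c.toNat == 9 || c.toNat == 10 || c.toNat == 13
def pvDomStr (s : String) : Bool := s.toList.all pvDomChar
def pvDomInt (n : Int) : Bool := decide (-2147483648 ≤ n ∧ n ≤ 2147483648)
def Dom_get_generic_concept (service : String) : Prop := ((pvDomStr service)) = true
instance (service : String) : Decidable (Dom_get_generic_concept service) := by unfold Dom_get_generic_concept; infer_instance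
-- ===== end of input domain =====

-- B replaces A's nested provider scan with one lookup in a precomputed reverse dict (simpler/idiomatic).

-- ===== PORT A =====
def svcEquivalents : List (String × PySem.Dict String String) :=
  [ ("object_storage", PySem.Dict.mk [("aws","S3"),("azure","Blob Storage"),("gcp","Cloud Storage"),("display","Object Storage")]),
    ("relational_db", PySem.Dict.mk [("aws","RDS"),("azure","Azure Database for PostgreSQL"),("gcp","Cloud SQL"),("display","Relational Database")]),
    ("identity", PySem.Dict.mk [("aws","IAM"),("azure","Azure Active Directory"),("gcp","Cloud IAM"),("display","Identity & Access Management")]),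
    ("compute", PySem.Dict.mk [("aws","EC2"),("azure","Virtual Machines"),("gcp","Compute Engine"),("display","Compute")]),
    ("serverless", PySem.Dict.mk [("aws","Lambda"),("azure","Azure Functions"),("gcp","Cloud Functions"),("display","Serverless Functions")]),
    ("cdn", PySem.Dict.mk [("aws","CloudFront"),("azure","Azure CDN"),("gcp","Cloud CDN"),("display","CDN")]) ]

-- inner 'for provider_name in (...)' loop: does any provider value (lowered) equal normalized?
def svcInner (ps : List String) (m : PySem.Dict String String) (n : String) : Bool :=
  match ps with
  | [] => false
  | p :: rest => if PySem.Str.lower (PySem.Dict.getD m p "") == n then true else svcInner rest m n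

-- outer 'for concept, mapping in SERVICE_EQUIVALENTS.items()' loop with early returns
def svcOuter (table : List (String × PySem.Dict String String)) (n : String) : Option String :=
  match table with
  | [] => none
  | (c, m) :: rest =>
      if n == c then some c
      else if svcInner ["aws", "azure", "gcp"] m n then some c
      else svcOuter rest n

def get_generic_concept (service : String) : Option String :=
  svcOuter svcEquivalents (PySem.Str.lower (PySem.Str.strip service))

-- ===== PORT B =====
def svcReverse : PySem.Dict String String :=
  PySem.Dict.mk
  [ ("object_storage","object_storage"), ("s3","object_storage"), ("blob storage","object_storage"), ("cloud storage","object_storage"),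
    ("relational_db","relational_db"), ("rds","relational_db"), ("azure database for postgresql","relational_db"), ("cloud sql","relational_db"),
    ("identity","identity"), ("iam","identity"), ("azure active directory","identity"), ("cloud iam","identity"),
    ("compute","compute"), ("ec2","compute"), ("virtual machines","compute"), ("compute engine","compute"),
    ("serverless","serverless"), ("lambda","serverless"), ("azure functions","serverless"), ("cloud functions","serverless"),
    ("cdn","cdn"), ("cloudfront","cdn"), ("azure cdn","cdn"), ("cloud cdn","cdn") ]

def get_generic_concept_alt (service : String) : Option String :=
  PySem.Dict.get? svcReverse (PySem.Str.lower (PySem.Str.strip service))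

-- ===== PRECONDITION & SPEC =====
def Spec_get_generic_concept (service : String) (out : Option String) : Prop := out = get_generic_concept_alt service
instance (service : String) (out : Option String) : Decidable (Spec_get_generic_concept service out) := by unfold Spec_get_generic_concept; infer_instance

-- ===== CLAIM (what is proved, stated in full; the proofs are below) =====
def Claim_equal_get_generic_concept : Prop := ∀ (service : String), Dom_get_generic_concept service → Spec_get_generic_concept service (get_generic_concept service)

-- ===== LEMMAS AND PROOFS =====

-- the two lookup structures agree on every normalized string (case split on the 24 candidate keys)
set_option maxHeartbeats 4000000 in
theorem svcOuter_eq_reverse (n : String) : svcOuter svcEquivalents n = PySem.Dict.get? svcReverse n := by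
  by_cases h1 : n = "object_storage"
  · subst h1; rfl
  by_cases h2 : n = "s3"
  · subst h2; rfl
  by_cases h3 : n = "blob storage"
  · subst h3; rfl
  by_cases h4 : n = "cloud storage"
  · subst h4; rfl
  by_cases h5 : n = "relational_db"
  · subst h5; rfl
  by_cases h6 : n = "rds"
  · subst h6; rfl
  by_cases h7 : n = "azure database for postgresql"
  · subst h7; rfl
  by_cases h8 : n = "cloud sql"
  · subst h8; rfl
  by_cases h9 : n = "identity"
  · subst h9; rfl
  by_cases h10 : n = "iam"
  · subst h10; rfl
  by_cases h11 : n = "azure active directory"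
  · subst h11; rfl
  by_cases h12 : n = "cloud iam"
  · subst h12; rfl
  by_cases h13 : n = "compute"
  · subst h13; rfl
  by_cases h14 : n = "ec2"
  · subst h14; rfl
  by_cases h15 : n = "virtual machines"
  · subst h15; rfl
  by_cases h16 : n = "compute engine"
  · subst h16; rfl
  by_cases h17 : n = "serverless"
  · subst h17; rfl
  by_cases h18 : n = "lambda"
  · subst h18; rfl
  by_cases h19 : n = "azure functions"
  · subst h19; rfl
  by_cases h20 : n = "cloud functions"
  · subst h20; rfl
  by_cases h21 : n = "cdn"
  · subst h21; rfl
  by_cases h22 : n = "cloudfront"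
  · subst h22; rfl
  by_cases h23 : n = "azure cdn"
  · subst h23; rfl
  by_cases h24 : n = "cloud cdn"
  · subst h24; rfl
  have e1 : PySem.Str.lower (PySem.Dict.getD (PySem.Dict.mk [("aws","S3"),("azure","Blob Storage"),("gcp","Cloud Storage"),("display","Object Storage")]) "aws" "") = "s3" := rfl
  have e2 : PySem.Str.lower (PySem.Dict.getD (PySem.Dict.mk [("aws","S3"),("azure","Blob Storage"),("gcp","Cloud Storage"),("display","Object Storage")]) "azure" "") = "blob storage" := rfl
  have e3 : PySem.Str.lower (PySem.Dict.getD (PySem.Dict.mk [("aws","S3"),("azure","Blob Storage"),("gcp","Cloud Storage"),("display","Object Storage")]) "gcp" "") = "cloud storage" := rfl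
  have e4 : PySem.Str.lower (PySem.Dict.getD (PySem.Dict.mk [("aws","RDS"),("azure","Azure Database for PostgreSQL"),("gcp","Cloud SQL"),("display","Relational Database")]) "aws" "") = "rds" := rfl
  have e5 : PySem.Str.lower (PySem.Dict.getD (PySem.Dict.mk [("aws","RDS"),("azure","Azure Database for PostgreSQL"),("gcp","Cloud SQL"),("display","Relational Database")]) "azure" "") = "azure database for postgresql" := rfl
  have e6 : PySem.Str.lower (PySem.Dict.getD (PySem.Dict.mk [("aws","RDS"),("azure","Azure Database for PostgreSQL"),("gcp","Cloud SQL"),("display","Relational Database")]) "gcp" "") = "cloud sql" := rfl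
  have e7 : PySem.Str.lower (PySem.Dict.getD (PySem.Dict.mk [("aws","IAM"),("azure","Azure Active Directory"),("gcp","Cloud IAM"),("display","Identity & Access Management")]) "aws" "") = "iam" := rfl
  have e8 : PySem.Str.lower (PySem.Dict.getD (PySem.Dict.mk [("aws","IAM"),("azure","Azure Active Directory"),("gcp","Cloud IAM"),("display","Identity & Access Management")]) "azure" "") = "azure active directory" := rfl
  have e9 : PySem.Str.lower (PySem.Dict.getD (PySem.Dict.mk [("aws","IAM"),("azure","Azure Active Directory"),("gcp","Cloud IAM"),("display","Identity & Access Management")]) "gcp" "") = "cloud iam" := rfl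
  have e10 : PySem.Str.lower (PySem.Dict.getD (PySem.Dict.mk [("aws","EC2"),("azure","Virtual Machines"),("gcp","Compute Engine"),("display","Compute")]) "aws" "") = "ec2" := rfl
  have e11 : PySem.Str.lower (PySem.Dict.getD (PySem.Dict.mk [("aws","EC2"),("azure","Virtual Machines"),("gcp","Compute Engine"),("display","Compute")]) "azure" "") = "virtual machines" := rfl
  have e12 : PySem.Str.lower (PySem.Dict.getD (PySem.Dict.mk [("aws","EC2"),("azure","Virtual Machines"),("gcp","Compute Engine"),("display","Compute")]) "gcp" "") = "compute engine" := rfl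
  have e13 : PySem.Str.lower (PySem.Dict.getD (PySem.Dict.mk [("aws","Lambda"),("azure","Azure Functions"),("gcp","Cloud Functions"),("display","Serverless Functions")]) "aws" "") = "lambda" := rfl
  have e14 : PySem.Str.lower (PySem.Dict.getD (PySem.Dict.mk [("aws","Lambda"),("azure","Azure Functions"),("gcp","Cloud Functions"),("display","Serverless Functions")]) "azure" "") = "azure functions" := rfl
  have e15 : PySem.Str.lower (PySem.Dict.getD (PySem.Dict.mk [("aws","Lambda"),("azure","Azure Functions"),("gcp","Cloud Functions"),("display","Serverless Functions")]) "gcp" "") = "cloud functions" := rfl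
  have e16 : PySem.Str.lower (PySem.Dict.getD (PySem.Dict.mk [("aws","CloudFront"),("azure","Azure CDN"),("gcp","Cloud CDN"),("display","CDN")]) "aws" "") = "cloudfront" := rfl
  have e17 : PySem.Str.lower (PySem.Dict.getD (PySem.Dict.mk [("aws","CloudFront"),("azure","Azure CDN"),("gcp","Cloud CDN"),("display","CDN")]) "azure" "") = "azure cdn" := rfl
  have e18 : PySem.Str.lower (PySem.Dict.getD (PySem.Dict.mk [("aws","CloudFront"),("azure","Azure CDN"),("gcp","Cloud CDN"),("display","CDN")]) "gcp" "") = "cloud cdn" := rfl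
  have b1 : (n == "object_storage") = false := beq_eq_false_iff_ne.mpr h1
  have b2 : (n == "relational_db") = false := beq_eq_false_iff_ne.mpr h5
  have b3 : (n == "identity") = false := beq_eq_false_iff_ne.mpr h9
  have b4 : (n == "compute") = false := beq_eq_false_iff_ne.mpr h13
  have b5 : (n == "serverless") = false := beq_eq_false_iff_ne.mpr h17
  have b6 : (n == "cdn") = false := beq_eq_false_iff_ne.mpr h21
  have c1 : ("object_storage" == n) = false := beq_eq_false_iff_ne.mpr (Ne.symm h1)
  have c2 : ("s3" == n) = false := beq_eq_false_iff_ne.mpr (Ne.symm h2)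
  have c3 : ("blob storage" == n) = false := beq_eq_false_iff_ne.mpr (Ne.symm h3)
  have c4 : ("cloud storage" == n) = false := beq_eq_false_iff_ne.mpr (Ne.symm h4)
  have c5 : ("relational_db" == n) = false := beq_eq_false_iff_ne.mpr (Ne.symm h5)
  have c6 : ("rds" == n) = false := beq_eq_false_iff_ne.mpr (Ne.symm h6)
  have c7 : ("azure database for postgresql" == n) = false := beq_eq_false_iff_ne.mpr (Ne.symm h7)
  have c8 : ("cloud sql" == n) = false := beq_eq_false_iff_ne.mpr (Ne.symm h8)
  have c9 : ("identity" == n) = false := beq_eq_false_iff_ne.mpr (Ne.symm h9)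
  have c10 : ("iam" == n) = false := beq_eq_false_iff_ne.mpr (Ne.symm h10)
  have c11 : ("azure active directory" == n) = false := beq_eq_false_iff_ne.mpr (Ne.symm h11)
  have c12 : ("cloud iam" == n) = false := beq_eq_false_iff_ne.mpr (Ne.symm h12)
  have c13 : ("compute" == n) = false := beq_eq_false_iff_ne.mpr (Ne.symm h13)
  have c14 : ("ec2" == n) = false := beq_eq_false_iff_ne.mpr (Ne.symm h14)
  have c15 : ("virtual machines" == n) = false := beq_eq_false_iff_ne.mpr (Ne.symm h15)
  have c16 : ("compute engine" == n) = false := beq_eq_false_iff_ne.mpr (Ne.symm h16)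
  have c17 : ("serverless" == n) = false := beq_eq_false_iff_ne.mpr (Ne.symm h17)
  have c18 : ("lambda" == n) = false := beq_eq_false_iff_ne.mpr (Ne.symm h18)
  have c19 : ("azure functions" == n) = false := beq_eq_false_iff_ne.mpr (Ne.symm h19)
  have c20 : ("cloud functions" == n) = false := beq_eq_false_iff_ne.mpr (Ne.symm h20)
  have c21 : ("cdn" == n) = false := beq_eq_false_iff_ne.mpr (Ne.symm h21)
  have c22 : ("cloudfront" == n) = false := beq_eq_false_iff_ne.mpr (Ne.symm h22)
  have c23 : ("azure cdn" == n) = false := beq_eq_false_iff_ne.mpr (Ne.symm h23)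
  have c24 : ("cloud cdn" == n) = false := beq_eq_false_iff_ne.mpr (Ne.symm h24)
  simp only [svcOuter, svcInner, svcEquivalents, svcReverse, PySem.Dict.get?_mk_cons, e1, e2, e3, e4, e5, e6, e7, e8, e9, e10, e11, e12, e13, e14, e15, e16, e17, e18, b1, b2, b3, b4, b5, b6, c1, c2, c3, c4, c5, c6, c7, c8, c9, c10, c11, c12, c13, c14, c15, c16, c17, c18, c19, c20, c21, c22, c23, c24, Bool.false_eq_true, if_false]
  rfl

-- ===== VERDICT (by name: the statement is the Claim_ definition above) =====
theorem get_generic_concept_spec : Claim_equal_get_generic_concept := by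
  intro s _
  unfold Spec_get_generic_concept get_generic_concept get_generic_concept_alt
  exact svcOuter_eq_reverse _
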